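-- pv_equiv track=rewrite | github.com/xiahongchi/DRAWER | perception/match.py | find_pattern_preserving_matches
-- ===== SOURCE A (Python) =====
-- def find_pattern_preserving_matches(gt_groups, pred_groups, location):
--     """Find matches that preserve vertical patterns at each x-coordinate."""
--     matches = []
--     matched_gt_x = set()
--     matched_pred_x = set()
--
--     # Sort x-coordinates to process in order from left to right
--     gt_x_values = sorted(gt_groups.keys())
--     pred_x_values = sorted(pred_groups.keys())
--
--     # Calculate distance between each possible pair of x-coordinate groups
--     x_distances = []
--     for gt_x in gt_x_values:
--         for pred_x in pred_x_values:
--             distance = abs(gt_x - pred_x)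
--             x_distances.append((distance, gt_x, pred_x))
--
--     x_distances.sort()  # Sort by distance
--
--     # Match groups that have the same pattern
--     for _, gt_x, pred_x in x_distances:
--         # Skip if either x is already matched
--         if gt_x in matched_gt_x or pred_x in matched_pred_x:
--             continue
--
--         gt_points = gt_groups[gt_x]
--         pred_points = pred_groups[pred_x]
--
--         # Only match if the patterns have the same number of components
--         if len(gt_points) == len(pred_points):
--             # Sort by y-coordinate to ensure pattern matching
--             gt_points.sort(key=lambda p: p[1])
--             pred_points.sort(key=lambda p: p[1])
--
--             # Check if patterns match
--             pattern_matches = []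
--             for (gt_idx, gt_y, gt_orig), (pred_idx, pred_y, pred_orig) in zip(gt_points, pred_points):
--                 gt_orig_x, gt_orig_y = gt_orig
--                 pred_orig_x, pred_orig_y = pred_orig
--                 pattern_matches.append(
--                     ((gt_orig_x, gt_orig_y, location),
--                      (pred_orig_x, pred_orig_y, location))
--                 )
--
--             # If we found a matching pattern, add all matches
--             matches.extend(pattern_matches)
--             matched_gt_x.add(gt_x)
--             matched_pred_x.add(pred_x)
--
--     return matches
-- ===== SOURCE B (Python) =====
-- def find_pattern_preserving_matches(gt_groups, pred_groups, location):
--     """Selection-based greedy: repeatedly extract the globally nearest unmatched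
--     (gt_x, pred_x) pair from a live candidate list, pruning the list on each
--     match, instead of materializing-and-sorting all pairs with matched-sets.
--     Does not mutate the input groups (uses sorted() instead of .sort())."""
--     gt_x_values = sorted(gt_groups.keys())
--     pred_x_values = sorted(pred_groups.keys())
--     pairs = [(abs(g - p), g, p) for g in gt_x_values for p in pred_x_values]
--     matches = []
--     while pairs:
--         best = pairs[0]
--         for q in pairs[1:]:
--             if q < best:
--                 best = q
--         pairs.remove(best)
--         _, g, p = best
--         gt_points = gt_groups[g]
--         pred_points = pred_groups[p]
--         if len(gt_points) == len(pred_points):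
--             gs = sorted(gt_points, key=lambda t: t[1])
--             ps = sorted(pred_points, key=lambda t: t[1])
--             for (_, _, (gox, goy)), (_, _, (pox, poy)) in zip(gs, ps):
--                 matches.append(((gox, goy, location), (pox, poy, location)))
--             pairs = [q for q in pairs if q[1] != g and q[2] != p]
--     return matches
-- ===== Notes on version B (the rewrite author's own statement) =====
-- stated objective: alternative
-- what changed: Replaced A's materialize-all-pairs-then-sort with matched-x sets by a selection-based greedy: a live candidate list from which the lexicographically nearest pair is extracted each round and which is pruned of a matched gt_x/pred_x, so no global sort and no matched sets; B also does not mutate the input groups (return-value equivalence).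
import Mathlib
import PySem

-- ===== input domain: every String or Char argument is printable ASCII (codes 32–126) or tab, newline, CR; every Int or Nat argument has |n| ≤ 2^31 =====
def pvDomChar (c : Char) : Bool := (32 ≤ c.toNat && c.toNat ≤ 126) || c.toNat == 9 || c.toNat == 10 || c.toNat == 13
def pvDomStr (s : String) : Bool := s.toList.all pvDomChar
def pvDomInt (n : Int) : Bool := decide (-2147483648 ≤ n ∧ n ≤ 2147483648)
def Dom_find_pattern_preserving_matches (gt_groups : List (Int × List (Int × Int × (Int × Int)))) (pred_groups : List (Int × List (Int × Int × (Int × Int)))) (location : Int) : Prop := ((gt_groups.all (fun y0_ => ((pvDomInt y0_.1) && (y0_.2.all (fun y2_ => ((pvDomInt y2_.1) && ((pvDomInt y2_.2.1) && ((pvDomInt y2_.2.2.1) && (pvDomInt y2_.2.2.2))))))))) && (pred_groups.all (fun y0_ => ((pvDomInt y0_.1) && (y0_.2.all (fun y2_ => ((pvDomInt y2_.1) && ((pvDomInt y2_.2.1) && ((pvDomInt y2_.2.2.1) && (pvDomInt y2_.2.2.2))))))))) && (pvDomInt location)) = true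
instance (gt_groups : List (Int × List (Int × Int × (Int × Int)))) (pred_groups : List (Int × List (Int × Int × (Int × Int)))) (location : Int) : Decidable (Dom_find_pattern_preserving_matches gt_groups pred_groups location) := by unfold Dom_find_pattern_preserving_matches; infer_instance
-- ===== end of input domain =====

-- B replaces A's materialize-all-pairs-then-sort + matched-sets greedy by a selection-based greedy
-- over a live, pruned candidate list (objective: alternative; same results).  A sorts the matched
-- groups' point lists IN PLACE; B does not mutate its arguments — the equivalence proved here is
-- about the RETURN value (A never re-reads a group after mutating it, so the returned values agree).

-- ===== PORT A =====
-- Python compares the (distance, gt_x, pred_x) tuples lexicographically; Mathlib's order on plain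
-- products is pointwise, so both ports compare through this lexicographic key (exact tuple order).
def pvKey3 (q : Int × Int × Int) : Lex (Int × Lex (Int × Int)) := toLex (q.1, toLex (q.2.1, q.2.2))

-- one body of A's 'for _, gt_x, pred_x in x_distances' loop, over state (matches, matched_gt_x, matched_pred_x)
def pvStepA (gtd prd : PySem.Dict Int (List (Int × Int × (Int × Int)))) (location : Int)
    (st : List ((Int × Int × Int) × (Int × Int × Int)) × PySem.Set Int × PySem.Set Int)
    (q : Int × Int × Int) : List ((Int × Int × Int) × (Int × Int × Int)) × PySem.Set Int × PySem.Set Int :=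
  if PySem.Set.contains st.2.1 q.2.1 || PySem.Set.contains st.2.2 q.2.2 then st
  else
    -- gt_groups[gt_x] / pred_groups[pred_x]: the key comes from .keys(), so KeyError is impossible
    let gt_points := (gtd.get? q.2.1).getD []
    let pred_points := (prd.get? q.2.2).getD []
    if gt_points.length = pred_points.length then
      let gs := PySem.List.sorted gt_points (fun t => t.2.1) false
      let ps := PySem.List.sorted pred_points (fun t => t.2.1) false
      let pattern_matches := (gs.zip ps).map (fun z =>
        ((z.1.2.2.1, z.1.2.2.2, location), (z.2.2.2.1, z.2.2.2.2, location)))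
      (st.1 ++ pattern_matches, PySem.Set.add st.2.1 q.2.1, PySem.Set.add st.2.2 q.2.2)
    else st

def find_pattern_preserving_matches (gt_groups : List (Int × List (Int × Int × (Int × Int)))) (pred_groups : List (Int × List (Int × Int × (Int × Int)))) (location : Int) : List ((Int × Int × Int) × (Int × Int × Int)) :=
  let gtd := PySem.Dict.ofList gt_groups
  let prd := PySem.Dict.ofList pred_groups
  let gt_x_values := PySem.List.sorted gtd.keys (fun x => x) false
  let pred_x_values := PySem.List.sorted prd.keys (fun x => x) false
  -- nested for-loops appending (distance, gt_x, pred_x)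
  let x_distances := gt_x_values.foldl (fun acc gt_x =>
    pred_x_values.foldl (fun acc2 pred_x => acc2 ++ [(|gt_x - pred_x|, gt_x, pred_x)]) acc) []
  -- x_distances.sort(): stable sort by the lexicographic tuple order
  let x_sorted := PySem.List.sorted x_distances pvKey3 false
  (x_sorted.foldl (pvStepA gtd prd location) ([], PySem.Set.empty, PySem.Set.empty)).1

-- ===== PORT B =====
-- the zip/append body shared by both Pythons (identical lines in Source A and Source B)
def pvPattern (location : Int) (gs ps : List (Int × Int × (Int × Int))) :
    List ((Int × Int × Int) × (Int × Int × Int)) :=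
  (gs.zip ps).map (fun z => ((z.1.2.2.1, z.1.2.2.2, location), (z.2.2.2.1, z.2.2.2.2, location)))

-- Source B's 'best = pairs[0]; for q in pairs[1:]: if q < best: best = q'
def pvSelMin (x : Int × Int × Int) (t : List (Int × Int × Int)) : Int × Int × Int :=
  t.foldl (fun b q => if pvKey3 q < pvKey3 b then q else b) x

theorem pvSelMin_mem (x : Int × Int × Int) (t : List (Int × Int × Int)) : pvSelMin x t ∈ x :: t := by
  induction t generalizing x with
  | nil => simp [pvSelMin]
  | cons y t ih =>
    by_cases hxy : pvKey3 y < pvKey3 x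
    · have := ih y
      simp only [pvSelMin, List.foldl_cons, if_pos hxy] at *
      rcases List.mem_cons.mp this with h | h <;> simp [h]
    · have := ih x
      simp only [pvSelMin, List.foldl_cons, if_neg hxy] at *
      rcases List.mem_cons.mp this with h | h <;> simp [h]

-- Source B's while-loop: extract the minimum pair, process it, prune the list on a match
def pvLoopB (gtd prd : PySem.Dict Int (List (Int × Int × (Int × Int)))) (location : Int)
    (ms : List ((Int × Int × Int) × (Int × Int × Int))) (pairs : List (Int × Int × Int)) :
    List ((Int × Int × Int) × (Int × Int × Int)) :=
  match pairs with
  | [] => ms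
  | x :: t =>
    let best := pvSelMin x t
    -- pairs.remove(best): best ∈ pairs, so ValueError is impossible; removes the first occurrence
    let rest := (x :: t).erase best
    let gt_points := (gtd.get? best.2.1).getD []
    let pred_points := (prd.get? best.2.2).getD []
    if gt_points.length = pred_points.length then
      pvLoopB gtd prd location
        (ms ++ pvPattern location (PySem.List.sorted gt_points (fun t => t.2.1) false)
          (PySem.List.sorted pred_points (fun t => t.2.1) false))
        (rest.filter (fun q => (q.2.1 != best.2.1) && (q.2.2 != best.2.2)))
    else pvLoopB gtd prd location ms rest
termination_by pairs.length
decreasing_by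
  · have hlen : ((x :: t).erase (pvSelMin x t)).length < (x :: t).length := by
      have := List.length_erase_of_mem (pvSelMin_mem x t)
      simp [this]
    exact Nat.lt_of_le_of_lt (List.length_filter_le _ _) hlen
  · have := List.length_erase_of_mem (pvSelMin_mem x t)
    simp [this]

def find_pattern_preserving_matches_alt (gt_groups : List (Int × List (Int × Int × (Int × Int)))) (pred_groups : List (Int × List (Int × Int × (Int × Int)))) (location : Int) : List ((Int × Int × Int) × (Int × Int × Int)) :=
  let gtd := PySem.Dict.ofList gt_groups
  let prd := PySem.Dict.ofList pred_groups
  let gt_x_values := PySem.List.sorted gtd.keys (fun x => x) false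
  let pred_x_values := PySem.List.sorted prd.keys (fun x => x) false
  -- [(abs(g - p), g, p) for g in gt_x_values for p in pred_x_values]
  let pairs := gt_x_values.flatMap (fun g => pred_x_values.map (fun p => (|g - p|, g, p)))
  pvLoopB gtd prd location [] pairs

-- ===== PRECONDITION & SPEC =====
def Spec_find_pattern_preserving_matches (gt_groups : List (Int × List (Int × Int × (Int × Int)))) (pred_groups : List (Int × List (Int × Int × (Int × Int)))) (location : Int) (out : List ((Int × Int × Int) × (Int × Int × Int))) : Prop := out = find_pattern_preserving_matches_alt gt_groups pred_groups location
instance (gt_groups : List (Int × List (Int × Int × (Int × Int)))) (pred_groups : List (Int × List (Int × Int × (Int × Int)))) (location : Int) (out : List ((Int × Int × Int) × (Int × Int × Int))) : Decidable (Spec_find_pattern_preserving_matches gt_groups pred_groups location out) := by unfold Spec_find_pattern_preserving_matches; infer_instance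

-- ===== CLAIM (what is proved, stated in full; the proofs are below) =====
def Claim_equal_find_pattern_preserving_matches : Prop := ∀ (gt_groups : List (Int × List (Int × Int × (Int × Int)))) (pred_groups : List (Int × List (Int × Int × (Int × Int)))) (location : Int), Dom_find_pattern_preserving_matches gt_groups pred_groups location → Spec_find_pattern_preserving_matches gt_groups pred_groups location (find_pattern_preserving_matches gt_groups pred_groups location)

-- ===== LEMMAS AND PROOFS =====

-- sorted-order recursion both sides are reduced to: process the head, prune on a match
def pvARec (gtd prd : PySem.Dict Int (List (Int × Int × (Int × Int)))) (location : Int)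
    (ms : List ((Int × Int × Int) × (Int × Int × Int))) (l : List (Int × Int × Int)) :
    List ((Int × Int × Int) × (Int × Int × Int)) :=
  match l with
  | [] => ms
  | x :: t =>
    let gt_points := (gtd.get? x.2.1).getD []
    let pred_points := (prd.get? x.2.2).getD []
    if gt_points.length = pred_points.length then
      pvARec gtd prd location
        (ms ++ pvPattern location (PySem.List.sorted gt_points (fun t => t.2.1) false)
          (PySem.List.sorted pred_points (fun t => t.2.1) false))
        (t.filter (fun q => (q.2.1 != x.2.1) && (q.2.2 != x.2.2)))
    else pvARec gtd prd location ms t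
termination_by l.length
decreasing_by
  · refine Nat.lt_succ_of_le (le_trans (le_of_eq List.length_unattach) ?_)
    exact le_trans (List.length_filter_le _ _) (le_of_eq List.length_attach)
  · simp

theorem pv_contains_add (s : PySem.Set Int) (x y : Int) :
    PySem.Set.contains (PySem.Set.add s x) y = (PySem.Set.contains s y || y == x) := by
  rw [Bool.eq_iff_iff]
  simp [PySem.Set.mem_add]

theorem pv_filter_shift (t : List (Int × Int × Int)) (mg mp : PySem.Set Int) (g p : Int) :
    t.filter (fun q => !(PySem.Set.contains (PySem.Set.add mg g) q.2.1
        || PySem.Set.contains (PySem.Set.add mp p) q.2.2))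
      = (t.filter (fun q => !(PySem.Set.contains mg q.2.1 || PySem.Set.contains mp q.2.2))).filter
          (fun q => (q.2.1 != g) && (q.2.2 != p)) := by
  rw [List.filter_filter]
  apply List.filter_congr
  intro a _
  rw [pv_contains_add, pv_contains_add, Bool.eq_iff_iff]
  simp [bne]
  tauto

-- A's fold over state = pvARec on the list filtered by the initial matched sets
theorem pvA_fold_eq_aRec (gtd prd : PySem.Dict Int (List (Int × Int × (Int × Int)))) (location : Int)
    (l : List (Int × Int × Int)) (ms : List ((Int × Int × Int) × (Int × Int × Int)))
    (mg mp : PySem.Set Int) :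
    (l.foldl (pvStepA gtd prd location) (ms, mg, mp)).1 =
      pvARec gtd prd location ms
        (l.filter (fun q => !(PySem.Set.contains mg q.2.1 || PySem.Set.contains mp q.2.2))) := by
  induction l generalizing ms mg mp with
  | nil => simp [pvARec]
  | cons x t ih =>
    rw [List.foldl_cons, List.filter_cons]
    by_cases hblk : (PySem.Set.contains mg x.2.1 || PySem.Set.contains mp x.2.2) = true
    · have hstep : pvStepA gtd prd location (ms, mg, mp) x = (ms, mg, mp) := by
        simp only [pvStepA]; rw [if_pos hblk]
      have hbb : (!(PySem.Set.contains mg x.2.1 || PySem.Set.contains mp x.2.2)) = false := by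
        rw [hblk]; rfl
      rw [hstep, ih, hbb, if_neg (by simp)]
    · have hbb : (!(PySem.Set.contains mg x.2.1 || PySem.Set.contains mp x.2.2)) = true := by
        rw [eq_false_of_ne_true hblk]; rfl
      rw [hbb, if_pos rfl]
      by_cases hlen : ((gtd.get? x.2.1).getD []).length = ((prd.get? x.2.2).getD []).length
      · have hstep : pvStepA gtd prd location (ms, mg, mp) x =
            (ms ++ pvPattern location
                (PySem.List.sorted ((gtd.get? x.2.1).getD []) (fun t => t.2.1) false)
                (PySem.List.sorted ((prd.get? x.2.2).getD []) (fun t => t.2.1) false),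
              PySem.Set.add mg x.2.1, PySem.Set.add mp x.2.2) := by
          simp only [pvStepA, pvPattern]; rw [if_neg hblk, if_pos hlen]
        rw [hstep, ih, pv_filter_shift]
        conv_rhs => rw [pvARec.eq_def]
        simp only []
        rw [if_pos hlen]
      · have hstep : pvStepA gtd prd location (ms, mg, mp) x = (ms, mg, mp) := by
          simp only [pvStepA]; rw [if_neg hblk, if_neg hlen]
        rw [hstep, ih]
        conv_rhs => rw [pvARec.eq_def]
        simp only []
        rw [if_neg hlen]

theorem pvSelMin_isMin (x : Int × Int × Int) (t : List (Int × Int × Int)) :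
    ∀ z ∈ x :: t, pvKey3 (pvSelMin x t) ≤ pvKey3 z := by
  induction t generalizing x with
  | nil => intro z hz; simp at hz; simp [pvSelMin, hz]
  | cons y t ih =>
    intro z hz
    have hstep : pvSelMin x (y :: t) = pvSelMin (if pvKey3 y < pvKey3 x then y else x) t := by
      by_cases hxy : pvKey3 y < pvKey3 x <;> simp [pvSelMin, List.foldl_cons, hxy]
    have hle : pvKey3 (pvSelMin (if pvKey3 y < pvKey3 x then y else x) t)
        ≤ pvKey3 (if pvKey3 y < pvKey3 x then y else x) :=
      ih _ _ (List.mem_cons_self)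
    have hx : pvKey3 (if pvKey3 y < pvKey3 x then y else x) ≤ pvKey3 x := by
      split_ifs with hc; exacts [le_of_lt hc, le_rfl]
    have hy : pvKey3 (if pvKey3 y < pvKey3 x then y else x) ≤ pvKey3 y := by
      split_ifs with hc; exacts [le_rfl, not_lt.mp hc]
    rw [hstep]
    rcases List.mem_cons.mp hz with h | h
    · subst h; exact le_trans hle hx
    · rcases List.mem_cons.mp h with h1 | h1
      · subst h1; exact le_trans hle hy
      · exact ih _ _ (List.mem_cons_of_mem _ h1)

-- selMin on a permutation of a strictly key-sorted nonempty list is that list's head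
theorem pvSelMin_eq_head (x : Int × Int × Int) (t s : List (Int × Int × Int))
    (hp : (x :: t).Perm s) (hs : s.Pairwise (fun a b => pvKey3 a < pvKey3 b)) (y : Int × Int × Int)
    (r : List (Int × Int × Int)) (hcons : s = y :: r) : pvSelMin x t = y := by
  subst hcons
  have hmem : pvSelMin x t ∈ y :: r := hp.subset (pvSelMin_mem x t)
  rcases List.mem_cons.mp hmem with h | h
  · exact h
  · exfalso
    have hlt : pvKey3 y < pvKey3 (pvSelMin x t) := (List.pairwise_cons.mp hs).1 _ h
    have hy : y ∈ x :: t := hp.symm.subset List.mem_cons_self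
    exact absurd (lt_of_lt_of_le hlt (pvSelMin_isMin x t y hy)) (lt_irrefl _)

-- B's extract-min loop on any permutation of a strictly key-sorted list = pvARec on that list
theorem pvB_loop_eq_aRec (gtd prd : PySem.Dict Int (List (Int × Int × (Int × Int)))) (location : Int)
    (s pairs : List (Int × Int × Int)) (hs : s.Pairwise (fun a b => pvKey3 a < pvKey3 b))
    (hp : pairs.Perm s) (ms : List ((Int × Int × Int) × (Int × Int × Int))) :
    pvLoopB gtd prd location ms pairs = pvARec gtd prd location ms s := by
  have main : ∀ (n : Nat) (s pairs : List (Int × Int × Int))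
      (ms : List ((Int × Int × Int) × (Int × Int × Int))), s.length ≤ n →
      s.Pairwise (fun a b => pvKey3 a < pvKey3 b) → pairs.Perm s →
      pvLoopB gtd prd location ms pairs = pvARec gtd prd location ms s := by
    intro n
    induction n with
    | zero =>
      intro s pairs ms hle hs hp
      have hs0 : s = [] := List.length_eq_zero_iff.mp (Nat.le_zero.mp hle)
      subst hs0
      have hp0 : pairs = [] := hp.eq_nil
      subst hp0
      rw [pvLoopB, pvARec]
    | succ n IH =>
      intro s pairs ms hle hs hp
      cases s with
      | nil =>
        have hp0 : pairs = [] := hp.eq_nil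
        subst hp0
        rw [pvLoopB, pvARec]
      | cons y r =>
        cases pairs with
        | nil => exact absurd hp.length_eq (by simp)
        | cons x t =>
          have hbest : pvSelMin x t = y := pvSelMin_eq_head x t (y :: r) hp hs y r rfl
          have hrest : ((x :: t).erase y).Perm r := by
            have := hp.erase y
            simpa [List.erase_cons_head] using this
          have hr : r.Pairwise (fun a b => pvKey3 a < pvKey3 b) := (List.pairwise_cons.mp hs).2
          have hrlen : r.length ≤ n := by simpa using hle
          rw [pvLoopB.eq_def]
          simp only [hbest]
          conv_rhs => rw [pvARec.eq_def]
          simp only []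
          by_cases hlen : ((gtd.get? y.2.1).getD []).length = ((prd.get? y.2.2).getD []).length
          · rw [if_pos hlen, if_pos hlen]
            exact IH _ _ _
              (le_trans (List.length_filter_le _ _) hrlen)
              (hr.sublist List.filter_sublist)
              (hrest.filter _)
          · rw [if_neg hlen, if_neg hlen]
            exact IH _ _ _ hrlen hr hrest
  exact main s.length s pairs ms le_rfl hs hp

theorem pvKey3_injective : Function.Injective pvKey3 := by
  rintro ⟨a1,a2,a3⟩ ⟨b1,b2,b3⟩ h
  simp only [pvKey3, toLex] at h
  simpa using h

theorem pv_pairs_nodup (gtx prx : List Int) (h1 : gtx.Nodup) (h2 : prx.Nodup) :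
    (gtx.flatMap (fun g => prx.map (fun p => ((|g - p|, g, p) : Int × Int × Int)))).Nodup := by
  have heq : (gtx.flatMap (fun g => prx.map (fun p => ((|g - p|, g, p) : Int × Int × Int))))
      = (gtx ×ˢ prx).map (fun z => (|z.1 - z.2|, z.1, z.2)) := by
    clear h1 h2
    induction gtx with
    | nil => rfl
    | cons g t ih => simp [List.product_cons, ih, List.map_map, Function.comp_def]
  rw [heq]
  refine (h1.product h2).map ?_
  rintro ⟨a1,a2⟩ ⟨b1,b2⟩ h
  simp only [Prod.mk.injEq] at h
  simp [h.2.1, h.2.2]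

-- the assembled core: A's sort-then-fold = B's extract-min loop, for nodup x-value lists
theorem pv_main (gtd prd : PySem.Dict Int (List (Int × Int × (Int × Int)))) (loc : Int)
    (gtx prx : List Int) (h1 : gtx.Nodup) (h2 : prx.Nodup) :
    ((PySem.List.sorted
        (gtx.foldl (fun acc g => prx.foldl (fun acc2 p => acc2 ++ [((|g - p|, g, p) : Int × Int × Int)]) acc) [])
        pvKey3 false).foldl (pvStepA gtd prd loc) ([], PySem.Set.empty, PySem.Set.empty)).1
      = pvLoopB gtd prd loc [] (gtx.flatMap (fun g => prx.map (fun p => (|g - p|, g, p)))) := by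
  have hbuild : gtx.foldl (fun acc g => prx.foldl (fun acc2 p => acc2 ++ [((|g - p|, g, p) : Int × Int × Int)]) acc) []
      = gtx.flatMap (fun g => prx.map (fun p => (|g - p|, g, p))) := by
    have hfun : (fun (acc : List (Int × Int × Int)) g => prx.foldl (fun acc2 p => acc2 ++ [((|g - p|, g, p) : Int × Int × Int)]) acc)
        = fun acc g => acc ++ prx.map (fun p => (|g - p|, g, p)) := by
      funext acc g
      exact PySem.List.foldl_append_singleton_eq_map _ _ _
    rw [hfun, PySem.List.foldl_append_eq_flatMap]
    simp
  rw [hbuild]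
  have hnd : (gtx.flatMap (fun g => prx.map (fun p => ((|g - p|, g, p) : Int × Int × Int)))).Nodup :=
    pv_pairs_nodup gtx prx h1 h2
  have hperm := PySem.List.sorted_perm
    (gtx.flatMap (fun g => prx.map (fun p => ((|g - p|, g, p) : Int × Int × Int)))) pvKey3 false
  have hsortnd := hperm.nodup_iff.mpr hnd
  have hlt : (PySem.List.sorted
      (gtx.flatMap (fun g => prx.map (fun p => ((|g - p|, g, p) : Int × Int × Int)))) pvKey3
      false).Pairwise (fun a b => pvKey3 a < pvKey3 b) := by
    refine ((PySem.List.sorted_pairwise _ pvKey3).and hsortnd).imp ?_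
    rintro a b ⟨hle, hne⟩
    exact lt_of_le_of_ne hle (fun e => hne (pvKey3_injective e))
  rw [pvA_fold_eq_aRec]
  have hfilter : (PySem.List.sorted
        (gtx.flatMap (fun g => prx.map (fun p => ((|g - p|, g, p) : Int × Int × Int)))) pvKey3
        false).filter (fun q => !(PySem.Set.contains PySem.Set.empty q.2.1
          || PySem.Set.contains PySem.Set.empty q.2.2)) = PySem.List.sorted
        (gtx.flatMap (fun g => prx.map (fun p => ((|g - p|, g, p) : Int × Int × Int)))) pvKey3 false := by
    apply List.filter_eq_self.mpr
    intro a _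
    rfl
  rw [hfilter]
  exact (pvB_loop_eq_aRec gtd prd loc _ _ hlt hperm.symm []).symm

-- ===== VERDICT (by name: the statement is the Claim_ definition above) =====
theorem find_pattern_preserving_matches_spec : Claim_equal_find_pattern_preserving_matches := by
  intro gt_groups pred_groups location _
  unfold Spec_find_pattern_preserving_matches
  unfold find_pattern_preserving_matches find_pattern_preserving_matches_alt
  exact pv_main (PySem.Dict.ofList gt_groups) (PySem.Dict.ofList pred_groups) location
    (PySem.List.sorted (PySem.Dict.ofList gt_groups).keys (fun x => x) false)
    (PySem.List.sorted (PySem.Dict.ofList pred_groups).keys (fun x => x) false)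
    ((PySem.List.sorted_perm _ _ _).nodup_iff.mpr (PySem.Dict.nodup_keys_ofList gt_groups))
    ((PySem.List.sorted_perm _ _ _).nodup_iff.mpr (PySem.Dict.nodup_keys_ofList pred_groups))
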